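-- pv_equiv track=rewrite | github.com/siddharthbc/CSR-graph-coloring | spikes/analysis/eval_axis_aligned.py | _count_diag
-- ===== SOURCE A (Python) =====
-- def _count_diag(v, assignment, nbrs, C):
--     pu = assignment[v]
--     ru, cu = pu // C, pu % C
--     d = 0
--     for u in nbrs:
--         pv = assignment[u]
--         if pv < 0 or pv == pu:
--             continue
--         rv, cv = pv // C, pv % C
--         if ru != rv and cu != cv:
--             d += 1
--     return d
-- ===== SOURCE B (Python) =====
-- def _count_diag(v, assignment, nbrs, C):
--     pu = assignment[v]
--     ru, cu = pu // C, pu % C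
--     # staged passes: collect valid neighbor colors, then inclusion-exclusion
--     good = [pv for pv in (assignment[u] for u in nbrs) if pv >= 0 and pv != pu]
--     same_row = sum(1 for pv in good if pv // C == ru)
--     same_col = sum(1 for pv in good if pv % C == cu)
--     # a valid neighbor never shares both row and column (that would mean pv == pu)
--     return len(good) - same_row - same_col
-- ===== Notes on version B (the rewrite author's own statement) =====
-- stated objective: alternative
-- what changed: B replaces A's single loop with a per-neighbor row-and-column test by staged passes: it first builds the list of valid neighbor colors, then counts same-row and same-column ones separately and combines them by inclusion-exclusion (valid because a valid neighbor never shares both row and column).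
import Mathlib
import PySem

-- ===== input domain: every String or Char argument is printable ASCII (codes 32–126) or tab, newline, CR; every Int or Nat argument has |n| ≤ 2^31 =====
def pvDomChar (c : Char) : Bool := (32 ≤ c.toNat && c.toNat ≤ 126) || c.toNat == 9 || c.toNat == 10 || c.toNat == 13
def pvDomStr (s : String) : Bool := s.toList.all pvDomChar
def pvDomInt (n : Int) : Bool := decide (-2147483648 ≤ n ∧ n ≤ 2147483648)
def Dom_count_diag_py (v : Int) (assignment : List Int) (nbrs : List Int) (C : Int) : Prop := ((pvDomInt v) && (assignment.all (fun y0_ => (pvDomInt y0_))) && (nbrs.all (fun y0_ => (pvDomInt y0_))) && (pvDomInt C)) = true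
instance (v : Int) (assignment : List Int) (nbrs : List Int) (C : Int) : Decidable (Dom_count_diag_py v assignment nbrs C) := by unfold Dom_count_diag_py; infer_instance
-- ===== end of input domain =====

-- B replaces A's single loop (per-neighbor row-and-column test) by staged passes:
-- collect the valid neighbor colors, then count same-row and same-column ones and
-- combine by inclusion-exclusion (alternative decomposition, same cost).

-- ===== PORT A =====
def count_diag_py (v : Int) (assignment : List Int) (nbrs : List Int) (C : Int) : Int :=
  match PySem.List.pyGet? assignment v with
  | none => 0          -- IndexError; excluded by Pre_
  | some pu =>
    let ru := PySem.Int.floordiv pu C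
    let cu := PySem.Int.mod pu C
    nbrs.foldl (fun d u =>
      match PySem.List.pyGet? assignment u with
      | none => d      -- IndexError; excluded by Pre_
      | some pv =>
        if pv < 0 ∨ pv = pu then d
        else
          let rv := PySem.Int.floordiv pv C
          let cv := PySem.Int.mod pv C
          if ru ≠ rv ∧ cu ≠ cv then d + 1 else d) 0

-- ===== PORT B =====
def count_diag_py_alt (v : Int) (assignment : List Int) (nbrs : List Int) (C : Int) : Int :=
  match PySem.List.pyGet? assignment v with
  | none => 0          -- IndexError; excluded by Pre_
  | some pu =>
    let ru := PySem.Int.floordiv pu C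
    let cu := PySem.Int.mod pu C
    -- filterMap drops an out-of-range u (IndexError in Python; excluded by Pre_)
    let good := (nbrs.filterMap (PySem.List.pyGet? assignment)).filter
      (fun pv => decide (pv ≥ 0) && decide (pv ≠ pu))
    let sameRow := good.countP (fun pv => decide (PySem.Int.floordiv pv C = ru))
    let sameCol := good.countP (fun pv => decide (PySem.Int.mod pv C = cu))
    (good.length : Int) - (sameRow : Int) - (sameCol : Int)

-- ===== PRECONDITION & SPEC =====
-- Pre_ excludes exactly the raising inputs: C = 0 (ZeroDivisionError) and
-- out-of-range indices v or u ∈ nbrs (IndexError).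
def Pre_count_diag_py (v : Int) (assignment : List Int) (nbrs : List Int) (C : Int) : Prop :=
  C ≠ 0 ∧ PySem.Raise.InRange assignment.length v ∧
    ∀ u ∈ nbrs, PySem.Raise.InRange assignment.length u
instance (v : Int) (assignment : List Int) (nbrs : List Int) (C : Int) : Decidable (Pre_count_diag_py v assignment nbrs C) := by unfold Pre_count_diag_py; infer_instance

def pvWitness_count_diag_py : Int × List Int × List Int × Int := (0, [4, 0, 5, -1], [1, 2, 3], 3)

def Spec_count_diag_py (v : Int) (assignment : List Int) (nbrs : List Int) (C : Int) (out : Int) : Prop := out = count_diag_py_alt v assignment nbrs C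
instance (v : Int) (assignment : List Int) (nbrs : List Int) (C : Int) (out : Int) : Decidable (Spec_count_diag_py v assignment nbrs C out) := by unfold Spec_count_diag_py; infer_instance

-- ===== CLAIM (what is proved, stated in full; the proofs are below) =====
def Claim_equal_count_diag_py : Prop := ∀ (v : Int) (assignment : List Int) (nbrs : List Int) (C : Int), Dom_count_diag_py v assignment nbrs C → Pre_count_diag_py v assignment nbrs C → Spec_count_diag_py v assignment nbrs C (count_diag_py v assignment nbrs C)

-- ===== LEMMAS AND PROOFS =====

-- a valid neighbor cannot share both the row and the column: that would force pv = pu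
lemma row_col_eq_imp_eq (pu pv C : Int)
    (hr : PySem.Int.floordiv pu C = PySem.Int.floordiv pv C)
    (hc : PySem.Int.mod pu C = PySem.Int.mod pv C) : pu = pv := by
  have h1 := PySem.Int.floordiv_mul_add_mod pu C
  have h2 := PySem.Int.floordiv_mul_add_mod pv C
  rw [hr, hc] at h1; omega

-- A's running count equals B's staged inclusion-exclusion count over the same suffix
lemma loop_eq (assignment : List Int) (pu C : Int) :
    ∀ (nbrs : List Int) (d : Int),
    (∀ u ∈ nbrs, PySem.Raise.InRange assignment.length u) →
    nbrs.foldl (fun d u =>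
      match PySem.List.pyGet? assignment u with
      | none => d
      | some pv =>
        if pv < 0 ∨ pv = pu then d
        else
          if PySem.Int.floordiv pu C ≠ PySem.Int.floordiv pv C ∧
             PySem.Int.mod pu C ≠ PySem.Int.mod pv C then d + 1 else d) d
    = d + (((nbrs.filterMap (PySem.List.pyGet? assignment)).filter
            (fun pv => decide (pv ≥ 0) && decide (pv ≠ pu))).length : Int)
        - (((nbrs.filterMap (PySem.List.pyGet? assignment)).filter
            (fun pv => decide (pv ≥ 0) && decide (pv ≠ pu))).countP
              (fun pv => decide (PySem.Int.floordiv pv C = PySem.Int.floordiv pu C)) : Int)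
        - (((nbrs.filterMap (PySem.List.pyGet? assignment)).filter
            (fun pv => decide (pv ≥ 0) && decide (pv ≠ pu))).countP
              (fun pv => decide (PySem.Int.mod pv C = PySem.Int.mod pu C)) : Int) := by
  intro nbrs
  induction nbrs with
  | nil => intro d _; simp
  | cons u rest ih =>
    intro d hmem
    have hu : PySem.Raise.InRange assignment.length u := hmem u (by simp)
    obtain ⟨pv, hget⟩ : ∃ pv, PySem.List.pyGet? assignment u = some pv := by
      cases h : PySem.List.pyGet? assignment u with
      | none => exact absurd hu (by rwa [PySem.List.pyGet?_eq_none_iff] at h)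
      | some x => exact ⟨x, rfl⟩
    have hrest : ∀ x ∈ rest, PySem.Raise.InRange assignment.length x :=
      fun x hx => hmem x (by simp [hx])
    simp only [List.foldl_cons, List.filterMap_cons, hget]
    by_cases hvalid : pv ≥ 0 ∧ pv ≠ pu
    · have hskip : ¬ (pv < 0 ∨ pv = pu) := by
        rcases hvalid with ⟨h1, h2⟩; push_neg; exact ⟨by omega, h2⟩
      have hfil : (decide (pv ≥ 0) && decide (pv ≠ pu)) = true := by
        simp [hvalid.1, hvalid.2]
      simp only [if_neg hskip, List.filter_cons, hfil, if_pos, List.countP_cons,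
        List.length_cons]
      by_cases hr : PySem.Int.floordiv pv C = PySem.Int.floordiv pu C
      · have hc : ¬ PySem.Int.mod pv C = PySem.Int.mod pu C := by
          intro hc
          exact hvalid.2 (row_col_eq_imp_eq pv pu C hr hc)
        rw [if_neg (by rintro ⟨h, -⟩; exact h hr.symm)]
        rw [ih d hrest]
        simp [hr, hc]
        ring
      · by_cases hc : PySem.Int.mod pv C = PySem.Int.mod pu C
        · rw [if_neg (by rintro ⟨-, h⟩; exact h hc.symm)]
          rw [ih d hrest]
          simp [hr, hc]
          ring
        · rw [if_pos ⟨fun h => hr h.symm, fun h => hc h.symm⟩]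
          rw [ih (d + 1) hrest]
          simp [hr, hc]
          ring
    · have hskip : pv < 0 ∨ pv = pu := by
        by_contra h; push_neg at h; exact hvalid ⟨by omega, h.2⟩
      have hfil : (decide (pv ≥ 0) && decide (pv ≠ pu)) = false := by
        rcases Decidable.em (pv ≥ 0) with h1 | h1
        · have h2 : pv = pu := by
            rcases hskip with h | h
            · omega
            · exact h
          simp [h2]
        · simp [h1]
      simp only [if_pos hskip, List.filter_cons, hfil]
      exact ih d hrest

-- ===== VERDICT (by name: the statement is the Claim_ definition above) =====
theorem count_diag_py_spec : Claim_equal_count_diag_py := by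
  intro v assignment nbrs C _ hpre
  unfold Spec_count_diag_py count_diag_py count_diag_py_alt
  cases hget : PySem.List.pyGet? assignment v with
  | none => rfl
  | some pu =>
    simp only []
    rw [loop_eq assignment pu C nbrs 0 hpre.2.2]
    ring
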